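-- pv_equiv track=rewrite | github.com/tamlog06/AntBook | Atcoder/2-1/2-1-1/ARC_029_A.py | solve
-- ===== SOURCE A (Python) =====
-- def solve(N, t):
--     ans = float('inf')
--     for i in range(2**N):
--         time = [0, 0]
--         for j in range(N):
--             if (i >> j) & 1:
--                 time[0] += t[j]
--             else:
--                 time[1] += t[j]
--
--         ans = min(ans, max(time))
--
--     return ans
-- ===== SOURCE B (Python) =====
-- def solve(N, t):
--     # subset-sum DP: set of achievable loads of machine 0; answer = min max(s, total - s)
--     total = 0
--     sums = {0}
--     for j in range(N):
--         x = t[j]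
--         total += x
--         sums |= {s + x for s in sums}
--     return min(max(s, total - s) for s in sums)
-- ===== Notes on version B (the rewrite author's own statement) =====
-- stated objective: alternative
-- what changed: replaces the enumeration of all 2^N bitmask assignments (re-scanning all N tasks per mask) by a subset-sum DP over the set of achievable machine-0 loads, minimizing max(s, total-s) over that set
import Mathlib
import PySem

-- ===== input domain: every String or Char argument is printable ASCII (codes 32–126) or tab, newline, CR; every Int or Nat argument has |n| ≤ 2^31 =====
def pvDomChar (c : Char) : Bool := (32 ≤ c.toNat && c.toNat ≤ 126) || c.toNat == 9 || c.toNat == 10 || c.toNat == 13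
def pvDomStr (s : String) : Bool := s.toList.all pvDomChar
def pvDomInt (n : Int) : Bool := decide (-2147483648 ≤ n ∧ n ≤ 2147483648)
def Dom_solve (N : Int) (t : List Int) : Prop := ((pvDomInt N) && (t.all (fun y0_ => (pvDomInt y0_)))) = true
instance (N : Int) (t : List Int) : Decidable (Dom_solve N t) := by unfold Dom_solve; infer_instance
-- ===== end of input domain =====

-- B replaces A's enumeration of all 2^N bitmask assignments by a subset-sum DP over the
-- set of achievable machine-0 loads (objective: alternative algorithm).

-- ===== PORT A =====
def solve (N : Int) (t : List Int) : Int :=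
  let ans : Option Int := (List.range (2 ^ N.toNat)).foldl
    (fun (ans : Option Int) (i : Nat) =>
      let time := (List.range N.toNat).foldl
        (fun (tm : Int × Int) (j : Nat) =>
          if (i >>> j) &&& 1 = 1 then (tm.1 + (PySem.List.pyGet? t (j : Int)).getD 0, tm.2)
          else (tm.1, tm.2 + (PySem.List.pyGet? t (j : Int)).getD 0)) ((0 : Int), (0 : Int))
      match ans with
      | none => some (max time.1 time.2)          -- min(inf, x) = x
      | some a => some (min a (max time.1 time.2))) none
  ans.getD 0   -- never none: range(2**N) is nonempty for N ≥ 0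

-- ===== PORT B =====
def solve_alt (N : Int) (t : List Int) : Int :=
  let st := (List.range N.toNat).foldl
    (fun (st : Int × PySem.Set Int) (j : Nat) =>
      let x := (PySem.List.pyGet? t (j : Int)).getD 0
      (st.1 + x, PySem.Set.union st.2 (st.2.map (fun s => s + x))))
    ((0 : Int), ([0] : PySem.Set Int))
  (PySem.List.min? (st.2.map (fun s => max s (st.1 - s))) (fun y => y)).getD 0

-- ===== PRECONDITION & SPEC =====
-- Pre_ excludes exactly the inputs where the Python A raises: N < 0 (range(2**N) is a
-- TypeError on the float 2**N) and N > len(t) (t[j] is an IndexError).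
def Pre_solve (N : Int) (t : List Int) : Prop := 0 ≤ N ∧ N ≤ (t.length : Int)
instance (N : Int) (t : List Int) : Decidable (Pre_solve N t) := by unfold Pre_solve; infer_instance
def pvWitness_solve : Int × List Int := (2, [3, 1])

def Spec_solve (N : Int) (t : List Int) (out : Int) : Prop := out = solve_alt N t
instance (N : Int) (t : List Int) (out : Int) : Decidable (Spec_solve N t out) := by unfold Spec_solve; infer_instance

-- ===== CLAIM (what is proved, stated in full; the proofs are below) =====
def Claim_equal_solve : Prop := ∀ (N : Int) (t : List Int), Dom_solve N t → Pre_solve N t → Spec_solve N t (solve N t)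

-- ===== LEMMAS AND PROOFS =====

-- t[j] totalized (Pre_ keeps j in range)
def pvG (t : List Int) (j : Nat) : Int := (PySem.List.pyGet? t (j : Int)).getD 0

-- A's inner loop: the (machine0, machine1) pair for mask i over the first n tasks
def pairA (t : List Int) (n : Nat) (i : Nat) : Int × Int :=
  (List.range n).foldl
    (fun (tm : Int × Int) (j : Nat) =>
      if (i >>> j) &&& 1 = 1 then (tm.1 + pvG t j, tm.2)
      else (tm.1, tm.2 + pvG t j)) ((0 : Int), (0 : Int))

def pvTotal (t : List Int) (n : Nat) : Int := (List.range n).foldl (fun a j => a + pvG t j) 0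

def pvSums (t : List Int) : Nat → PySem.Set Int
  | 0 => [0]
  | n + 1 => PySem.Set.union (pvSums t n) ((pvSums t n).map (fun s => s + pvG t n))

lemma pairA_congr (t : List Int) (i i' : Nat) (n : Nat)
    (h : ∀ j < n, (i >>> j) &&& 1 = (i' >>> j) &&& 1) :
    pairA t n i = pairA t n i' := by
  unfold pairA
  apply PySem.List.foldl_congr_mem'
  intro j hj acc
  rw [h j (List.mem_range.mp hj)]

lemma bit_and_one_eq_testBit (m j : Nat) : ((m >>> j) &&& 1) = (if m.testBit j then 1 else 0) := by
  rw [Nat.and_one_is_mod, Nat.shiftRight_eq_div_pow, Nat.testBit_eq_decide_div_mod_eq]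
  rcases h : decide (m / 2 ^ j % 2 = 1) with _ | _ <;> simp_all

lemma pairA_succ (t : List Int) (n i : Nat) :
    pairA t (n + 1) i =
      (if (i >>> n) &&& 1 = 1 then ((pairA t n i).1 + pvG t n, (pairA t n i).2)
       else ((pairA t n i).1, (pairA t n i).2 + pvG t n)) := by
  unfold pairA
  rw [List.range_succ, List.foldl_append]
  rfl

lemma pvTotal_succ (t : List Int) (n : Nat) : pvTotal t (n + 1) = pvTotal t n + pvG t n := by
  unfold pvTotal
  rw [List.range_succ, List.foldl_append]
  rfl

lemma pair_sum (t : List Int) (n i : Nat) : (pairA t n i).1 + (pairA t n i).2 = pvTotal t n := by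
  induction n with
  | zero => rfl
  | succ n ih =>
    rw [pairA_succ, pvTotal_succ]
    split <;> simp only [] <;> omega

-- the list of machine-0 loads A enumerates
def pvL (t : List Int) (n : Nat) : List Int :=
  (List.range (2 ^ n)).map (fun i => (pairA t n i).1)

lemma pvL_succ (t : List Int) (n : Nat) :
    pvL t (n + 1) = pvL t n ++ (pvL t n).map (fun s => s + pvG t n) := by
  unfold pvL
  rw [pow_succ, mul_two, List.range_add, List.map_append, List.map_map]
  congr 1
  · apply List.map_congr_left
    intro i hi
    rw [pairA_succ]
    have hbit : i.testBit n = false := Nat.testBit_lt_two_pow (List.mem_range.mp hi)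
    rw [bit_and_one_eq_testBit, hbit]
    simp
  · rw [List.map_map]
    apply List.map_congr_left
    intro i hi
    have hi' := List.mem_range.mp hi
    show (pairA t (n + 1) (2 ^ n + i)).1 = (pairA t n i).1 + pvG t n
    rw [pairA_succ]
    have hbit : (2 ^ n + i).testBit n = true := by
      rw [Nat.testBit_two_pow_add_eq, Nat.testBit_lt_two_pow hi']
      rfl
    rw [bit_and_one_eq_testBit, hbit]
    have hcongr : pairA t n (2 ^ n + i) = pairA t n i := by
      apply pairA_congr
      intro j hj
      rw [bit_and_one_eq_testBit, bit_and_one_eq_testBit, Nat.testBit_two_pow_add_gt hj]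
    simp [hcongr]

lemma mem_pvL_iff (t : List Int) : ∀ (n : Nat) (x : Int), x ∈ pvL t n ↔ x ∈ pvSums t n := by
  intro n
  induction n with
  | zero => intro x; simp [pvL, pvSums, pairA]
  | succ n ih =>
    intro x
    rw [pvL_succ, pvSums]
    simp only [List.mem_append, PySem.Set.mem_union, List.mem_map, ih]

lemma pvL_ne_nil (t : List Int) (n : Nat) : pvL t n ≠ [] := by
  unfold pvL
  simp [List.range_eq_nil]

-- A's running-min-with-infinity fold
lemma optfold_some (f : Nat → Int) (l : List Nat) (a : Int) :
    l.foldl (fun (o : Option Int) (i : Nat) =>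
        match o with
        | none => some (f i)
        | some b => some (min b (f i))) (some a)
      = some ((l.map f).foldl min a) := by
  induction l generalizing a with
  | nil => rfl
  | cons x xs ih => simp [List.foldl, ih]

lemma optfold_eq_min? (f : Nat → Int) (l : List Nat) (hl : l ≠ []) :
    l.foldl (fun (o : Option Int) (i : Nat) =>
        match o with
        | none => some (f i)
        | some b => some (min b (f i))) none
      = PySem.List.min? (l.map f) (fun y => y) := by
  cases l with
  | nil => exact absurd rfl hl
  | cons x xs =>
    rw [List.foldl_cons, List.map_cons, PySem.List.min?_id_cons, optfold_some]

lemma min?_congr_mem (l1 l2 : List Int) (h1 : l1 ≠ [])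
    (h : ∀ x, x ∈ l1 ↔ x ∈ l2) :
    PySem.List.min? l1 (fun y => y) = PySem.List.min? l2 (fun y => y) := by
  have h2 : l2 ≠ [] := by
    cases l1 with
    | nil => exact absurd rfl h1
    | cons a l =>
      intro hnil
      have := (h a).mp (List.mem_cons_self ..)
      simp [hnil] at this
  rcases hm1 : PySem.List.min? l1 (fun y => y) with _ | m1
  · exact absurd ((PySem.List.min?_eq_none_iff l1 _).mp hm1) h1
  rcases hm2 : PySem.List.min? l2 (fun y => y) with _ | m2
  · exact absurd ((PySem.List.min?_eq_none_iff l2 _).mp hm2) h2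
  have hmem1 := PySem.List.min?_mem hm1
  have hmem2 := PySem.List.min?_mem hm2
  have le1 : m1 ≤ m2 := PySem.List.min?_isMin hm1 m2 ((h m2).mpr hmem2)
  have le2 : m2 ≤ m1 := PySem.List.min?_isMin hm2 m1 ((h m1).mp hmem1)
  exact congrArg some (le_antisymm le1 le2)

-- B's fold computes (total, subset sums)
lemma alt_fold (t : List Int) (n : Nat) :
    (List.range n).foldl
      (fun (st : Int × PySem.Set Int) (j : Nat) =>
        let x := (PySem.List.pyGet? t (j : Int)).getD 0
        (st.1 + x, PySem.Set.union st.2 (st.2.map (fun s => s + x))))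
      ((0 : Int), ([0] : PySem.Set Int))
      = (pvTotal t n, pvSums t n) := by
  induction n with
  | zero => rfl
  | succ n ih =>
    rw [List.range_succ, List.foldl_append, ih, pvTotal_succ]
    rfl

lemma solve_eq_min? (t : List Int) (n : Nat) :
    ((List.range (2 ^ n)).foldl
      (fun (ans : Option Int) (i : Nat) =>
        let time := (List.range n).foldl
          (fun (tm : Int × Int) (j : Nat) =>
            if (i >>> j) &&& 1 = 1 then (tm.1 + (PySem.List.pyGet? t (j : Int)).getD 0, tm.2)
            else (tm.1, tm.2 + (PySem.List.pyGet? t (j : Int)).getD 0)) ((0 : Int), (0 : Int))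
        match ans with
        | none => some (max time.1 time.2)
        | some a => some (min a (max time.1 time.2))) none)
      = PySem.List.min? ((pvSums t n).map (fun s => max s (pvTotal t n - s))) (fun y => y) := by
  have hrange : List.range (2 ^ n) ≠ [] := by simp [List.range_eq_nil]
  have h1 := optfold_eq_min? (fun i => max (pairA t n i).1 (pairA t n i).2) (List.range (2 ^ n)) hrange
  have h2 : PySem.List.min? ((List.range (2 ^ n)).map
        (fun i => max (pairA t n i).1 (pairA t n i).2)) (fun y => y)
      = PySem.List.min? ((pvL t n).map (fun s => max s (pvTotal t n - s))) (fun y => y) := by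
    congr 1
    unfold pvL
    rw [List.map_map]
    apply List.map_congr_left
    intro i _
    have hs := pair_sum t n i
    show max (pairA t n i).1 (pairA t n i).2 = max (pairA t n i).1 (pvTotal t n - (pairA t n i).1)
    omega
  have h3 : PySem.List.min? ((pvL t n).map (fun s => max s (pvTotal t n - s))) (fun y => y)
      = PySem.List.min? ((pvSums t n).map (fun s => max s (pvTotal t n - s))) (fun y => y) := by
    apply min?_congr_mem
    · simp only [ne_eq, List.map_eq_nil_iff]
      exact pvL_ne_nil t n
    · intro x
      simp only [List.mem_map, mem_pvL_iff]
  exact h1.trans (h2.trans h3)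

lemma main_eq (N : Int) (t : List Int) : solve N t = solve_alt N t := by
  unfold solve solve_alt
  simp only [alt_fold, solve_eq_min?]

-- ===== VERDICT (by name: the statement is the Claim_ definition above) =====
theorem solve_spec : Claim_equal_solve := by
  intro N t _ _
  unfold Spec_solve
  exact main_eq N t
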